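-- pv_equiv track=rewrite | github.com/Bouzomgi/Updated-Attendence | autoAttend.py | adjustText
-- ===== SOURCE A (Python) =====
-- def adjustText(txt):
-- 	if txt.isspace() or not txt: return txt
-- 	txt = list(txt)
-- 	txt[0] = txt[0].upper()
-- 	for index in range(len(txt)-1):
-- 		if txt[index] in ("-", " "):
-- 			txt[index + 1] = txt[index + 1].upper()
-- 	return ''.join(txt)
-- ===== SOURCE B (Python) =====
-- def adjustText(txt):
--     # Staged split/join: split into space-separated words, split each word on
--     # hyphens, uppercase the first character of every piece, and rejoin.
--     def cap(s):
--         return s[:1].upper() + s[1:]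
--     return ' '.join('-'.join(cap(part) for part in word.split('-'))
--                     for word in txt.split(' '))
-- ===== Notes on version B (the rewrite author's own statement) =====
-- stated objective: idiomatic
-- what changed: Replaces the guard-plus-in-place char-list mutation loop (indexing into a list and rewriting entries after separators) with staged split/join passes: split on spaces, split each word on hyphens, uppercase the first character of every piece, rejoin; the isspace/empty guard disappears because splitting and rejoining whitespace is the identity.
import Mathlib
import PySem

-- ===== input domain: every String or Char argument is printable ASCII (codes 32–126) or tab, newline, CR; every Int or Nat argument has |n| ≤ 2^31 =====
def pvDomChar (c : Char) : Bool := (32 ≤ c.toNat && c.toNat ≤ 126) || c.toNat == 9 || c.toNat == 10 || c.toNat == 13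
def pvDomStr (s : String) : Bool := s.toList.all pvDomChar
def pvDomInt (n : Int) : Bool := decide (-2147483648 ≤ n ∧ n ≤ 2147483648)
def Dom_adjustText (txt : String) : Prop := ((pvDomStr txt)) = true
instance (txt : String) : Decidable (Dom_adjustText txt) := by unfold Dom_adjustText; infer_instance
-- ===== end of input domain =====

-- B replaces A's guard-plus-in-place-mutation index loop by staged split/join passes:
-- split on spaces, split each word on hyphens, uppercase each piece's first character,
-- rejoin (objective: idiomatic).


-- ===== PORT A =====
-- literal transliteration: guard, list(txt), txt[0] = txt[0].upper(), then the index loop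
-- mutating txt[index+1] when txt[index] is "-" or " "
def adjustText (txt : String) : String :=
  if PySem.Str.strIsspace txt || txt = "" then txt
  else
    let l := txt.toList
    let l := l.set 0 (PySem.Chars.upperChar (l.getD 0 ' '))
    let l := (List.range (l.length - 1)).foldl
      (fun s i =>
        if s.getD i ' ' = '-' ∨ s.getD i ' ' = ' ' then
          s.set (i + 1) (PySem.Chars.upperChar (s.getD (i + 1) ' '))
        else s) l
    String.ofList l

-- ===== PORT B =====
-- Source B: cap(s) = s[:1].upper() + s[1:]; then
-- ' '.join('-'.join(cap(part) for part in word.split('-')) for word in txt.split(' '))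
def adjustText_alt (txt : String) : String :=
  String.ofList (PySem.Chars.join [' ']
    ((PySem.Chars.splitOn txt.toList [' ']).map (fun w =>
      PySem.Chars.join ['-']
        ((PySem.Chars.splitOn w ['-']).map (fun p =>
          PySem.Chars.upper (PySem.Chars.slice p none (some 1)) ++
            PySem.Chars.slice p (some 1) none)))))

-- ===== PRECONDITION & SPEC =====
def Spec_adjustText (txt : String) (out : String) : Prop := out = adjustText_alt txt
instance (txt : String) (out : String) : Decidable (Spec_adjustText txt out) := by unfold Spec_adjustText; infer_instance

-- ===== CLAIM (what is proved, stated in full; the proofs are below) =====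
def Claim_equal_adjustText : Prop := ∀ (txt : String), Dom_adjustText txt → Spec_adjustText txt (adjustText txt)

-- ===== LEMMAS AND PROOFS =====

-- "is '-' or ' '" as a Bool, proofs only
def pvIsSep (c : Char) : Bool := c == '-' || c == ' '

-- reference recursion: uppercase the head iff the flag is set, flag for the tail = head is a separator
def pvCap : Bool → List Char → List Char
  | _, [] => []
  | b, c :: cs => (if b then PySem.Chars.upperChar c else c) :: pvCap (pvIsSep c) cs

-- reference split on a single-character separator (Python's str.split(sep))
def pvSplit (sep : Char) : List Char → List (List Char)
  | [] => [[]]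
  | c :: cs =>
    if c = sep then [] :: pvSplit sep cs
    else
      match pvSplit sep cs with
      | [] => [[c]]
      | p :: ps => (c :: p) :: ps

-- capitalize the first char of a piece (Source B's cap, in match form)
def pvCapF : List Char → List Char
  | [] => []
  | c :: cs => PySem.Chars.upperChar c :: cs

-- the inner hyphen pass with the head piece capitalized iff b
def pvJC (b : Bool) (l : List Char) : List Char :=
  PySem.Chars.join ['-']
    ((if b then pvCapF ((pvSplit '-' l).headD []) else (pvSplit '-' l).headD []) ::
      ((pvSplit '-' l).tail).map pvCapF)

-- Source B's per-word transform
def pvF0 (w : List Char) : List Char :=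
  PySem.Chars.join ['-'] ((PySem.Chars.splitOn w ['-']).map (fun p =>
    PySem.Chars.upper (PySem.Chars.slice p none (some 1)) ++ PySem.Chars.slice p (some 1) none))

-- the outer space pass with the head word's head piece capitalized iff b
def pvJS (b : Bool) (l : List Char) : List Char :=
  PySem.Chars.join [' ']
    (pvJC b ((pvSplit ' ' l).headD []) :: ((pvSplit ' ' l).tail).map pvF0)

lemma pvIsSep_iff (c : Char) : pvIsSep c = true ↔ (c = '-' ∨ c = ' ') := by
  simp [pvIsSep]

lemma pvSep_upper (c : Char) :
    (PySem.Chars.upperChar c = '-' ∨ PySem.Chars.upperChar c = ' ') ↔ (c = '-' ∨ c = ' ') := by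
  simp only [PySem.Chars.upperChar, PySem.Chars.islower]
  split_ifs with h
  · simp only [decide_eq_true_eq, Bool.and_eq_true] at h
    have h97 : 97 ≤ c.toNat := h.1
    have h122 : c.toNat ≤ 122 := h.2
    have hv : Nat.isValidChar (c.toNat - 32) := Or.inl (by omega)
    constructor
    · rintro (h1 | h1) <;>
      · have := congrArg Char.toNat h1
        rw [Char.toNat_ofNat, if_pos hv] at this
        first
          | (rw [show ('-').toNat = 45 from rfl] at this; omega)
          | (rw [show (' ').toNat = 32 from rfl] at this; omega)
    · rintro (h1 | h1) <;> subst h1 <;> simp_all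
  · simp

lemma pvIsSep_upper (c : Char) : pvIsSep (PySem.Chars.upperChar c) = pvIsSep c := by
  by_cases h : pvIsSep c = true
  · rw [h]
    rw [pvIsSep_iff] at h ⊢
    exact (pvSep_upper c).mpr h
  · rw [Bool.not_eq_true] at h
    rw [h]
    rw [Bool.eq_false_iff, Ne, pvIsSep_iff] at h ⊢
    exact fun hc => h ((pvSep_upper c).mp hc)

lemma pvUpper_isspace (c : Char) (h : PySem.Chars.isspace c = true) :
    PySem.Chars.upperChar c = c := by
  simp only [PySem.Chars.isspace] at h
  simp only [PySem.Chars.upperChar, PySem.Chars.islower]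
  rw [if_neg]
  simp only [decide_eq_true_eq, Bool.and_eq_true, not_and]
  intro h97
  have : 97 ≤ c.toNat := h97
  simp only [Bool.or_eq_true, Bool.and_eq_true, decide_eq_true_eq] at h
  intro h122
  have : c.toNat ≤ 122 := h122
  omega

lemma pvCap_length (b : Bool) (l : List Char) : (pvCap b l).length = l.length := by
  induction l generalizing b with
  | nil => rfl
  | cons c cs ih => simp [pvCap, ih]

lemma pvCap_id (b : Bool) (l : List Char) (h : ∀ c ∈ l, PySem.Chars.upperChar c = c) :
    pvCap b l = l := by
  induction l generalizing b with
  | nil => rfl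
  | cons c cs ih =>
    simp only [pvCap]
    rw [ih _ (fun x hx => h x (List.mem_cons_of_mem _ hx))]
    have hc := h c (List.mem_cons_self)
    cases b <;> simp [hc]

lemma pvCap_getD_zero (b : Bool) (c : Char) (cs : List Char) :
    (pvCap b (c :: cs)).getD 0 ' ' = if b then PySem.Chars.upperChar c else c := by
  simp [pvCap]

lemma pvCap_getD_succ (b : Bool) (l : List Char) (j : Nat) (hj : j + 1 < l.length) :
    (pvCap b l).getD (j + 1) ' ' =
      if pvIsSep (l.getD j ' ') then PySem.Chars.upperChar (l.getD (j + 1) ' ')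
      else l.getD (j + 1) ' ' := by
  induction l generalizing b j with
  | nil => simp at hj
  | cons c cs ih =>
    cases j with
    | zero =>
      cases cs with
      | nil => simp at hj
      | cons d ds => simp [pvCap]
    | succ j' =>
      simp only [List.length_cons] at hj
      have := ih (pvIsSep c) j' (by omega)
      simpa [pvCap] using this

-- ---- splitOn equals pvSplit ----

lemma pvSplit_ne_nil (sep : Char) (l : List Char) : pvSplit sep l ≠ [] := by
  cases l with
  | nil => simp [pvSplit]
  | cons c cs =>
    simp only [pvSplit]
    split_ifs
    · simp
    · cases h : pvSplit sep cs <;> simp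

lemma pvSplit_sep (sep : Char) (cs : List Char) :
    pvSplit sep (sep :: cs) = [] :: pvSplit sep cs := by
  simp [pvSplit]

lemma pvSplit_ne (sep c : Char) (cs q : List Char) (qs : List (List Char)) (hc : c ≠ sep)
    (hq : pvSplit sep cs = q :: qs) : pvSplit sep (c :: cs) = (c :: q) :: qs := by
  simp [pvSplit, hc, hq]

lemma pvGo (sep : Char) (l : List Char) (fuel : Nat) (cur : List Char)
    (acc : List (List Char)) (hf : l.length ≤ fuel) :
    PySem.Chars.splitOn.go [sep] fuel l cur acc =
      acc.reverse ++ (pvSplit sep l).modifyHead (cur.reverse ++ ·) := by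
  induction l generalizing fuel cur acc with
  | nil =>
    cases fuel with
    | zero => rw [PySem.Chars.splitOn.go]; simp [pvSplit]
    | succ f =>
      rw [PySem.Chars.splitOn.go]
      · simp [pvSplit]
      · omega
  | cons c rest ih =>
    cases fuel with
    | zero => simp at hf
    | succ f =>
      rw [PySem.Chars.splitOn.go]
      simp only [List.length_cons] at hf
      by_cases hc : c = sep
      · rw [if_pos (by simp [List.isPrefixOf, hc])]
        rw [show ([sep].length : Nat) = 1 from rfl, List.drop_one, List.tail_cons]
        rw [ih f [] (cur.reverse :: acc) (by omega)]
        subst hc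
        rw [pvSplit_sep]
        cases pvSplit c rest <;> simp
      · rw [if_neg (by simp [List.isPrefixOf]; exact fun h => absurd h.symm hc)]
        rw [ih f (c :: cur) acc (by omega)]
        cases h : pvSplit sep rest with
        | nil => exact absurd h (pvSplit_ne_nil sep rest)
        | cons p ps => rw [pvSplit_ne sep c rest p ps hc h]; simp

lemma pvSplitOn_eq (sep : Char) (l : List Char) :
    PySem.Chars.splitOn l [sep] = pvSplit sep l := by
  unfold PySem.Chars.splitOn
  rw [pvGo sep l (l.length + 1) [] [] (by omega)]
  cases h : pvSplit sep l with
  | nil => exact absurd h (pvSplit_ne_nil sep l)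
  | cons p ps => simp

-- ---- the port's cap equals pvCapF ----

lemma pvCapF_eq (p : List Char) :
    PySem.Chars.upper (PySem.Chars.slice p none (some 1)) ++ PySem.Chars.slice p (some 1) none
      = pvCapF p := by
  cases p with
  | nil => rfl
  | cons c cs =>
    simp only [PySem.Chars.slice_eq_listSlice]
    rw [PySem.List.slice_to (c :: cs) (by norm_num : (0:Int) ≤ 1),
      PySem.List.slice_from (c :: cs) (by norm_num : (0:Int) ≤ 1)]
    simp [PySem.Chars.upper, pvCapF]

-- ---- join head lemma ----

lemma pvJoin_cons_head (sep : List Char) (x : Char) (xs : List Char)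
    (rest : List (List Char)) :
    PySem.Chars.join sep ((x :: xs) :: rest) = x :: PySem.Chars.join sep (xs :: rest) := by
  cases rest with
  | nil => simp [PySem.Chars.join_singleton]
  | cons q r => simp [PySem.Chars.join_cons_cons]

-- ---- inner pass: pvJC head lemmas ----

lemma pvJC_nil (b : Bool) : pvJC b [] = [] := by
  cases b <;>
    simp [pvJC, show pvSplit '-' [] = [[]] from rfl, pvCapF, PySem.Chars.join_singleton]

lemma pvJC_cons (b : Bool) (c : Char) (p : List Char) (hc : c ≠ ' ') :
    pvJC b (c :: p) = (if b then PySem.Chars.upperChar c else c) :: pvJC (pvIsSep c) p := by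
  by_cases h : c = '-'
  · subst h
    unfold pvJC
    rw [pvSplit_sep]
    cases hq : pvSplit '-' p with
    | nil => exact absurd hq (pvSplit_ne_nil _ _)
    | cons q qs =>
      have hu : PySem.Chars.upperChar '-' = '-' := by decide
      have hs : pvIsSep '-' = true := by decide
      cases b <;> simp [pvCapF, PySem.Chars.join_cons_cons, hu, hs]
  · have hs : pvIsSep c = false := by
      rw [Bool.eq_false_iff, Ne, pvIsSep_iff]
      rintro (h1 | h1) <;> [exact h h1; exact hc h1]
    unfold pvJC
    cases hq : pvSplit '-' p with
    | nil => exact absurd hq (pvSplit_ne_nil _ _)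
    | cons q qs =>
      rw [pvSplit_ne '-' c p q qs h hq]
      cases b <;> simp [pvCapF, pvJoin_cons_head, hs]

-- ---- Source B's per-word transform equals pvJC true ----

lemma pvF0_eq (w : List Char) : pvF0 w = pvJC true w := by
  unfold pvF0 pvJC
  rw [pvSplitOn_eq]
  simp only [pvCapF_eq]
  cases h : pvSplit '-' w with
  | nil => exact absurd h (pvSplit_ne_nil _ _)
  | cons p ps => simp

-- ---- outer pass: pvJS equals pvCap ----

lemma pvJS_eq_cap (b : Bool) (l : List Char) : pvJS b l = pvCap b l := by
  induction l generalizing b with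
  | nil =>
    unfold pvJS
    rw [show pvSplit ' ' [] = [[]] from rfl]
    simp [pvJC_nil, PySem.Chars.join_singleton, pvCap]
  | cons c cs ih =>
    have hu : PySem.Chars.upperChar ' ' = ' ' := by decide
    by_cases hc : c = ' '
    · subst hc
      unfold pvJS
      rw [pvSplit_sep]
      cases hq : pvSplit ' ' cs with
      | nil => exact absurd hq (pvSplit_ne_nil _ _)
      | cons q qs =>
        have hih := ih true
        unfold pvJS at hih
        rw [hq] at hih
        simp only [List.headD_cons, List.tail_cons, List.map_cons] at hih ⊢
        rw [pvF0_eq, PySem.Chars.join_cons_cons]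
        have hsp : pvIsSep ' ' = true := by decide
        cases b <;> simp [pvCap, hu, hsp, hih, pvJC_nil]
    · unfold pvJS
      cases hq : pvSplit ' ' cs with
      | nil => exact absurd hq (pvSplit_ne_nil _ _)
      | cons q qs =>
        rw [pvSplit_ne ' ' c cs q qs hc hq]
        have hih := ih (pvIsSep c)
        unfold pvJS at hih
        rw [hq] at hih
        simp only [List.headD_cons, List.tail_cons] at hih ⊢
        rw [pvJC_cons b c q hc, pvJoin_cons_head, hih]
        simp [pvCap]

-- ---- B equals pvCap true ----

lemma pvAlt_eq (txt : String) : adjustText_alt txt = String.ofList (pvCap true txt.toList) := by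
  unfold adjustText_alt
  rw [pvSplitOn_eq]
  congr 1
  rw [← pvJS_eq_cap true]
  unfold pvJS
  cases h : pvSplit ' ' txt.toList with
  | nil => exact absurd h (pvSplit_ne_nil _ _)
  | cons p ps =>
    simp only [List.headD_cons, List.tail_cons, List.map_cons]
    show PySem.Chars.join [' '] (pvF0 p :: ps.map pvF0) = _
    rw [pvF0_eq]

-- ---- A equals pvCap true (loop invariant) ----

lemma pvInv (m k : Nat) (l : List Char) (hk : k + m = l.length - 1) (hne : l ≠ []) :
    (List.range' k m).foldl
      (fun s i =>
        if s.getD i ' ' = '-' ∨ s.getD i ' ' = ' ' then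
          s.set (i + 1) (PySem.Chars.upperChar (s.getD (i + 1) ' '))
        else s)
      ((pvCap true l).take (k + 1) ++ l.drop (k + 1)) = pvCap true l := by
  have hlen : 1 ≤ l.length := List.length_pos_iff.mpr hne
  induction m generalizing k with
  | zero =>
    have hk1 : k + 1 = l.length := by omega
    have h1 : (pvCap true l).length ≤ k + 1 := by rw [pvCap_length]; omega
    have h2 : l.length ≤ k + 1 := by omega
    simp [List.range', List.take_of_length_le h1, List.drop_of_length_le h2]
  | succ m ih =>
    rw [List.range'_succ, List.foldl_cons]
    have hk2 : k + 2 ≤ l.length := by omega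
    have hTlen : (pvCap true l).length = l.length := pvCap_length _ _
    have htk : ((pvCap true l).take (k + 1)).length = k + 1 := by
      rw [List.length_take]; omega
    have hread : ((pvCap true l).take (k + 1) ++ l.drop (k + 1)).getD k ' ' =
        (pvCap true l).getD k ' ' := by
      rw [List.getD_append _ _ _ _ (by omega), List.getD_eq_getElem?_getD,
        List.getElem?_take_of_lt (by omega), ← List.getD_eq_getElem?_getD]
    have hsep : pvIsSep (((pvCap true l).take (k + 1) ++ l.drop (k + 1)).getD k ' ') =
        pvIsSep (l.getD k ' ') := by
      rw [hread]
      cases k with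
      | zero =>
        cases l with
        | nil => exact absurd rfl hne
        | cons c cs => rw [pvCap_getD_zero, if_pos rfl, pvIsSep_upper]; rfl
      | succ j =>
        rw [pvCap_getD_succ true l j (by omega)]
        split_ifs with h
        · rw [pvIsSep_upper]
        · rfl
    have hdropc : l.drop (k + 1) = l.getD (k + 1) ' ' :: l.drop (k + 2) := by
      rw [List.drop_eq_getElem_cons (by omega : k + 1 < l.length)]
      rw [List.getD_eq_getElem?_getD, List.getElem?_eq_getElem (by omega)]
      rfl
    have hstep : (if ((pvCap true l).take (k + 1) ++ l.drop (k + 1)).getD k ' ' = '-' ∨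
          ((pvCap true l).take (k + 1) ++ l.drop (k + 1)).getD k ' ' = ' ' then
          ((pvCap true l).take (k + 1) ++ l.drop (k + 1)).set (k + 1)
            (PySem.Chars.upperChar
              (((pvCap true l).take (k + 1) ++ l.drop (k + 1)).getD (k + 1) ' '))
        else (pvCap true l).take (k + 1) ++ l.drop (k + 1)) =
        (pvCap true l).take (k + 2) ++ l.drop (k + 2) := by
      have hcapk1 : (pvCap true l).getD (k + 1) ' ' =
          if pvIsSep (l.getD k ' ') then PySem.Chars.upperChar (l.getD (k + 1) ' ')
          else l.getD (k + 1) ' ' := pvCap_getD_succ true l k (by omega)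
      have htake2 : (pvCap true l).take (k + 2) =
          (pvCap true l).take (k + 1) ++ [(pvCap true l).getD (k + 1) ' '] := by
        rw [List.take_add_one, List.getElem?_eq_getElem (by omega)]
        simp [List.getD_eq_getElem?_getD, List.getElem?_eq_getElem (by omega : k + 1 < (pvCap true l).length)]
      by_cases h : (pvCap true l).getD k ' ' = '-' ∨ (pvCap true l).getD k ' ' = ' '
      · rw [if_pos (by rw [hread]; exact h)]
        have hsepk : pvIsSep (l.getD k ' ') = true := by
          rw [← hsep, hread]; exact (pvIsSep_iff _).mpr h
        have hget1 : ((pvCap true l).take (k + 1) ++ l.drop (k + 1)).getD (k + 1) ' ' =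
            l.getD (k + 1) ' ' := by
          rw [List.getD_eq_getElem?_getD, List.getElem?_append_right (le_of_eq htk), htk]
          simp only [Nat.sub_self]
          rw [hdropc]
          rfl
        rw [hget1, List.set_append, if_neg (by omega), htk, Nat.sub_self, hdropc]
        rw [htake2, hcapk1, if_pos hsepk]
        simp
      · rw [if_neg (by rw [hread]; exact h)]
        have hsepk : pvIsSep (l.getD k ' ') = false := by
          rw [← hsep, hread]
          rw [Bool.eq_false_iff, Ne, pvIsSep_iff]; exact h
        rw [htake2, hcapk1, hsepk, if_neg (by simp)]
        rw [hdropc]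
        simp
    rw [hstep]
    exact ih (k + 1) (by omega)

lemma pvA_eq (txt : String) (hne : txt ≠ "") (hns : PySem.Str.strIsspace txt = false) :
    adjustText txt = String.ofList (pvCap true txt.toList) := by
  unfold adjustText
  rw [if_neg (by simp only [PySem.Str.strIsspace_eq] at hns; simp [hne, hns])]
  cases h : txt.toList with
  | nil => exact absurd (String.toList_eq_nil_iff.mp h) hne
  | cons c cs =>
    simp only
    have hset : (c :: cs).set 0 (PySem.Chars.upperChar ((c :: cs).getD 0 ' ')) =
        (pvCap true (c :: cs)).take 1 ++ (c :: cs).drop 1 := by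
      simp [pvCap, List.set]
    rw [hset]
    congr 1
    have hlen : ((c :: cs).set 0 (PySem.Chars.upperChar ((c :: cs).getD 0 ' '))).length =
        (c :: cs).length := List.length_set ..
    rw [hset] at hlen
    rw [hlen, List.range_eq_range']
    exact pvInv ((c :: cs).length - 1) 0 (c :: cs) (by omega) (by simp)

-- ===== VERDICT (by name: the statement is the Claim_ definition above) =====
theorem adjustText_spec : Claim_equal_adjustText := by
  intro txt _
  unfold Spec_adjustText
  rw [pvAlt_eq]
  by_cases hne : txt = ""
  · subst hne; rfl
  · by_cases hs : PySem.Str.strIsspace txt = true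
    · unfold adjustText
      rw [if_pos (by simp only [PySem.Str.strIsspace_eq] at hs; simp [hs])]
      have hall : ∀ c ∈ txt.toList, PySem.Chars.isspace c = true := by
        have := hs
        simp only [PySem.Str.strIsspace, PySem.Chars.strIsspace, Bool.and_eq_true,
          List.all_eq_true] at this
        exact fun c hc => this.2 c hc
      rw [pvCap_id _ _ (fun c hc => pvUpper_isspace c (hall c hc)), String.ofList_toList]
    · exact pvA_eq txt hne (Bool.not_eq_true _ ▸ hs)
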